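-- pv_equiv track=rewrite | github.com/joaquinnicita/practicasGrafos | src/practica3.py | encuentra_camino_simple
-- ===== SOURCE A (Python) =====
-- def encuentra_camino_simple(grafo_lista, nodo_ini, nodo_fin):
--     '''
--     Ejemplo Entrada:
--         (['a','b','c','d','e','f'],[('a','b'),('a','d'),('b','d'),('b','c'),('c','d'),('c','e'),('d','e'),('c','f')])
-- 	d
--     Ejemplo retorno:
--         ['a','b','c','d']
--     '''
--     vertices, aristas = grafo_lista
--     grafo = {vertice: [] for vertice in vertices}
--     for v1, v2 in aristas:
--         grafo[v1].append(v2)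
--         grafo[v2].append(v1)
--
--     camino = []
--     visitados = {vertice: False for vertice in vertices}
--
--     def dfs(nodo_actual):
--         visitados[nodo_actual] = True
--         camino.append(nodo_actual)
--         if nodo_actual == nodo_fin:
--             return True
--         for vecino in grafo[nodo_actual]:
--             if not visitados[vecino] and dfs(vecino):
--                 return True
--         camino.pop()
--         return False
--
--     if dfs(nodo_ini):
--         return camino
--     else:
--         return []
-- ===== SOURCE B (Python) =====
-- def encuentra_camino_simple(grafo_lista, nodo_ini, nodo_fin):
--     # Iterative DFS with an explicit stack of (node, next-neighbor-index) frames,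
--     # simulating A's recursion faithfully (visited marked on first reach, never unset).
--     vertices, aristas = grafo_lista
--     grafo = {vertice: [] for vertice in vertices}
--     for v1, v2 in aristas:
--         grafo[v1].append(v2)
--         grafo[v2].append(v1)
--
--     visitados = {vertice: False for vertice in vertices}
--     visitados[nodo_ini] = True
--     if nodo_ini == nodo_fin:
--         return [nodo_ini]
--
--     stack = [(nodo_ini, 0)]
--     while stack:
--         nodo, i = stack[-1]
--         vecinos = grafo[nodo]
--         if i < len(vecinos):
--             stack[-1] = (nodo, i + 1)
--             vecino = vecinos[i]
--             if not visitados[vecino]: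
--                 visitados[vecino] = True
--                 if vecino == nodo_fin:
--                     return [n for n, _ in stack] + [vecino]
--                 stack.append((vecino, 0))
--         else:
--             stack.pop()
--     return []
-- ===== Notes on version B (the rewrite author's own statement) =====
-- stated objective: alternative
-- what changed: A's recursive DFS with a shared mutable path (append/pop on backtrack) is replaced by an iterative DFS over an explicit stack of (node, next-neighbor-index) frames; the path is read off the stack when the end node is reached.
import Mathlib
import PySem

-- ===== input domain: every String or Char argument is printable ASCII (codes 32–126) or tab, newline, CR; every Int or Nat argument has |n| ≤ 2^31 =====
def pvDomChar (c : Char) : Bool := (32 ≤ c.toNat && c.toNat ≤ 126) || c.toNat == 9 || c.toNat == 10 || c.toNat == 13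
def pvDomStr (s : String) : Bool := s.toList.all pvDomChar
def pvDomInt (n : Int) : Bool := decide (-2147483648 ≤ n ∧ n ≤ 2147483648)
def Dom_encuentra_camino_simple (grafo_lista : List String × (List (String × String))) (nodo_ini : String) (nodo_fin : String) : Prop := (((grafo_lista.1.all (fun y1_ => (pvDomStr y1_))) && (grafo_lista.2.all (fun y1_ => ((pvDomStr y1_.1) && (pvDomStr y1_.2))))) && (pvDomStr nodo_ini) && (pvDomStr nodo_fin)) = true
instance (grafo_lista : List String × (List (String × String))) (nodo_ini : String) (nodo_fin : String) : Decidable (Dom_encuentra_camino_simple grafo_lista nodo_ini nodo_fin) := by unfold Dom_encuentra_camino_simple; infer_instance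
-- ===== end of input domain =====

-- B replaces A's recursive DFS (shared mutable path, append/pop) by an iterative DFS over an
-- explicit stack of (node, next-neighbor-index) frames; same visit order, same returned path.

-- ===== PORT A =====
-- grafo[v1].append(v2): on a missing key Python raises KeyError (excluded by Pre_); there the port leaves d unchanged
def pvAppendNb (d : PySem.Dict String (List String)) (k x : String) : PySem.Dict String (List String) :=
  match d.get? k with
  | none => d
  | some l => d.insert k (l ++ [x])

-- grafo = {v: [] for v in vertices}; for v1, v2 in aristas: grafo[v1].append(v2); grafo[v2].append(v1)
def pvBuildGrafo (vertices : List String) (aristas : List (String × String)) : PySem.Dict String (List String) :=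
  aristas.foldl (fun d e => pvAppendNb (pvAppendNb d e.1 e.2) e.2 e.1)
    (vertices.foldl (fun d v => d.insert v ([] : List String)) PySem.Dict.empty)

-- visitados = {v: False for v in vertices}
def pvVis0 (vertices : List String) : PySem.Dict String Bool :=
  vertices.foldl (fun d v => d.insert v false) PySem.Dict.empty

-- def dfs(nodo_actual), with the shared mutable state (visitados, camino) threaded explicitly.
-- fuel only guards totality (the wrapper's fuel is proved sufficient below); none = fuel ran out.
-- 'grafo[nodo_actual]' raising KeyError (missing key) is excluded by Pre_; that branch returns a dead end.
mutual
def pvDfsA (g : PySem.Dict String (List String)) (nfin : String) :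
    Nat → String → PySem.Dict String Bool → List String →
    Option (Bool × PySem.Dict String Bool × List String)
  | 0, _, _, _ => none
  | fuel+1, nodo, vis, cam =>
    let vis1 := vis.insert nodo true
    let cam1 := cam ++ [nodo]
    if nodo = nfin then some (true, vis1, cam1)
    else
      match g.get? nodo with
      | none => some (false, vis1, cam)
      | some vecinos => pvLoopA g nfin fuel vecinos vis1 cam1
  termination_by fuel _ _ _ => (fuel, 0)

-- 'for vecino in grafo[nodo_actual]: …' then 'camino.pop(); return False'
def pvLoopA (g : PySem.Dict String (List String)) (nfin : String) :
    Nat → List String → PySem.Dict String Bool → List String →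
    Option (Bool × PySem.Dict String Bool × List String)
  | _, [], vis, cam => some (false, vis, cam.dropLast)
  | fuel, v :: vs, vis, cam =>
    if vis.getD v false then pvLoopA g nfin fuel vs vis cam
    else
      match pvDfsA g nfin fuel v vis cam with
      | none => none
      | some (true, vis', cam') => some (true, vis', cam')
      | some (false, vis', cam') => pvLoopA g nfin fuel vs vis' cam'
  termination_by fuel vs _ _ => (fuel, vs.length + 1)
end

def encuentra_camino_simple (grafo_lista : List String × (List (String × String))) (nodo_ini : String) (nodo_fin : String) : List String :=
  let vertices := grafo_lista.1
  let aristas := grafo_lista.2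
  let grafo := pvBuildGrafo vertices aristas
  let visitados := pvVis0 vertices
  match pvDfsA grafo nodo_fin (vertices.length + 2) nodo_ini visitados [] with
  | some (true, _, cam) => cam
  | _ => []

-- ===== PORT B =====
-- while stack: … (B's explicit-stack loop; fuel only guards totality, proved sufficient below;
-- 'grafo[nodo]' raising KeyError is excluded by Pre_, that branch drops the frame)
def pvStepB (g : PySem.Dict String (List String)) (nfin : String) :
    Nat → List (String × Nat) → PySem.Dict String Bool → Option (List String)
  | 0, _, _ => none
  | _+1, [], _ => some []
  | fuel+1, (nodo, i) :: rest, vis =>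
    match g.get? nodo with
    | none => pvStepB g nfin fuel rest vis
    | some vecinos =>
      if h : i < vecinos.length then
        let vecino := vecinos[i]
        if vis.getD vecino false then pvStepB g nfin fuel ((nodo, i+1) :: rest) vis
        else if vecino = nfin then
          some ((((nodo, i+1) :: rest).map Prod.fst).reverse ++ [vecino])
        else pvStepB g nfin fuel ((vecino, 0) :: (nodo, i+1) :: rest) (vis.insert vecino true)
      else pvStepB g nfin fuel rest vis

def encuentra_camino_simple_alt (grafo_lista : List String × (List (String × String))) (nodo_ini : String) (nodo_fin : String) : List String :=
  let vertices := grafo_lista.1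
  let aristas := grafo_lista.2
  let grafo := pvBuildGrafo vertices aristas
  let visitados := (pvVis0 vertices).insert nodo_ini true
  if nodo_ini = nodo_fin then [nodo_ini]
  else
    match pvStepB grafo nodo_fin
        ((2*aristas.length+1)*(2*aristas.length+2)+2*aristas.length+2) [(nodo_ini, 0)] visitados with
    | some r => r
    | none => []

-- ===== PRECONDITION & SPEC =====
-- Pre_ excludes exactly the inputs where the Python raises KeyError: an edge endpoint that is not a
-- vertex, or a start node that is neither a vertex nor equal to the end node (both A and B raise there).
def Pre_encuentra_camino_simple (grafo_lista : List String × (List (String × String))) (nodo_ini : String) (nodo_fin : String) : Prop :=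
  (∀ e ∈ grafo_lista.2, e.1 ∈ grafo_lista.1 ∧ e.2 ∈ grafo_lista.1) ∧
  (nodo_ini ∈ grafo_lista.1 ∨ nodo_ini = nodo_fin)
instance (grafo_lista : List String × (List (String × String))) (nodo_ini : String) (nodo_fin : String) : Decidable (Pre_encuentra_camino_simple grafo_lista nodo_ini nodo_fin) := by unfold Pre_encuentra_camino_simple; infer_instance

def pvWitness_encuentra_camino_simple : (List String × (List (String × String))) × String × String :=
  ((["a","b","c","d","e","f"], [("a","b"),("a","d"),("b","d"),("b","c"),("c","d"),("c","e"),("d","e"),("c","f")]), "a", "d")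

def Spec_encuentra_camino_simple (grafo_lista : List String × (List (String × String))) (nodo_ini : String) (nodo_fin : String) (out : List String) : Prop := out = encuentra_camino_simple_alt grafo_lista nodo_ini nodo_fin
instance (grafo_lista : List String × (List (String × String))) (nodo_ini : String) (nodo_fin : String) (out : List String) : Decidable (Spec_encuentra_camino_simple grafo_lista nodo_ini nodo_fin out) := by unfold Spec_encuentra_camino_simple; infer_instance

-- ===== CLAIM (what is proved, stated in full; the proofs are below) =====
def Claim_equal_encuentra_camino_simple : Prop := ∀ (grafo_lista : List String × (List (String × String))) (nodo_ini : String) (nodo_fin : String), Dom_encuentra_camino_simple grafo_lista nodo_ini nodo_fin → Pre_encuentra_camino_simple grafo_lista nodo_ini nodo_fin → Spec_encuentra_camino_simple grafo_lista nodo_ini nodo_fin (encuentra_camino_simple grafo_lista nodo_ini nodo_fin)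

-- ===== LEMMAS AND PROOFS =====

-- endpoints of the edge list (universe every pushed neighbour belongs to)
def pvEndP (aristas : List (String × String)) : List String :=
  aristas.flatMap (fun e => [e.1, e.2])

-- number of not-yet-visited nodes of a universe list
def pvUnvis (l : List String) (vis : PySem.Dict String Bool) : Nat :=
  (l.filter (fun k => !vis.getD k false)).length

-- spec-side view of B's stack: what A's neighbour loops return from this point on
def pvProcA (g : PySem.Dict String (List String)) (nfin : String) (F : Nat) :
    List (String × Nat) → PySem.Dict String Bool → List String
  | [], _ => []
  | (nodo, i) :: rest, vis =>
    match g.get? nodo with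
    | none => pvProcA g nfin F rest vis
    | some vecinos =>
      match pvLoopA g nfin F (vecinos.drop i) vis ((((nodo, i) :: rest).map Prod.fst).reverse) with
      | some (true, _, cam') => cam'
      | some (false, vis', _) => pvProcA g nfin F rest vis'
      | none => []

-- decreasing measure for B's loop
def pvPhi (g : PySem.Dict String (List String)) (aristas : List (String × String))
    (stack : List (String × Nat)) (vis : PySem.Dict String Bool) : Nat :=
  pvUnvis (PySem.Set.ofList (pvEndP aristas)) vis * (2*aristas.length+2)
    + (stack.map (fun p => (g.getD p.1 []).length - p.2)).sum + stack.length

lemma pvVis0_getD_aux (vertices : List String) :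
    ∀ d : PySem.Dict String Bool, (∀ k, d.getD k false = false) →
    ∀ k, (vertices.foldl (fun d v => d.insert v false) d).getD k false = false := by
  induction vertices with
  | nil => intro d h k; simpa using h k
  | cons v t ih =>
    intro d h k
    simp only [List.foldl_cons]
    exact ih _ (fun k' => by rw [PySem.Dict.getD_insert]; split <;> [rfl; exact h k']) k

lemma pvVis0_getD (vertices : List String) (k : String) :
    (pvVis0 vertices).getD k false = false :=
  pvVis0_getD_aux vertices _ (fun k' => by simp [PySem.Dict.getD_empty]) k

lemma pvKeys_appendNb (d : PySem.Dict String (List String)) (k x : String) :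
    (pvAppendNb d k x).keys = d.keys := by
  unfold pvAppendNb
  cases hd : d.get? k with
  | none => rfl
  | some l =>
    apply PySem.Dict.keys_insert_of_contains
    rw [PySem.Dict.contains_eq_isSome_get?, hd]; rfl

lemma pvKeys_buildGrafo (vertices : List String) (aristas : List (String × String)) :
    (pvBuildGrafo vertices aristas).keys = PySem.List.dedup vertices := by
  unfold pvBuildGrafo
  have h1 : ∀ (es : List (String × String)) (d : PySem.Dict String (List String)),
      (es.foldl (fun d e => pvAppendNb (pvAppendNb d e.1 e.2) e.2 e.1) d).keys = d.keys := by
    intro es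
    induction es with
    | nil => intro d; rfl
    | cons e t ih => intro d; simp only [List.foldl_cons]; rw [ih, pvKeys_appendNb, pvKeys_appendNb]
  rw [h1, PySem.Dict.keys_foldl_insert, PySem.Dict.keys_empty, PySem.List.dedup_eq_ofList]
  exact PySem.Set.update_nil_left _

lemma pvAppendNb_get?_prop (d : PySem.Dict String (List String)) (k x : String)
    (P : String → Prop) (hP : ∀ k' l, d.get? k' = some l → ∀ y ∈ l, P y) (hx : P x) :
    ∀ k' l, (pvAppendNb d k x).get? k' = some l → ∀ y ∈ l, P y := by
  unfold pvAppendNb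
  cases hd : d.get? k with
  | none => exact hP
  | some l0 =>
    intro k' l h y hy
    rw [PySem.Dict.get?_insert] at h
    split at h
    · cases h
      rcases List.mem_append.mp hy with h1 | h1
      · exact hP k l0 hd y h1
      · simp at h1; exact h1 ▸ hx
    · exact hP k' l h y hy

lemma pvAdj_mem (vertices : List String) (aristas : List (String × String)) (k : String)
    (l : List String) (h : (pvBuildGrafo vertices aristas).get? k = some l) :
    ∀ x ∈ l, x ∈ pvEndP aristas := by
  revert k l h
  unfold pvBuildGrafo
  have base : ∀ (d : PySem.Dict String (List String)),
      (∀ k' l', d.get? k' = some l' → ∀ y ∈ l', y ∈ pvEndP aristas) →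
      ∀ vs : List String, ∀ k' l', ((vs.foldl (fun d v => d.insert v ([]:List String)) d).get? k' = some l') →
        ∀ y ∈ l', y ∈ pvEndP aristas := by
    intro d hd vs
    induction vs generalizing d with
    | nil => exact hd
    | cons v t ih =>
      simp only [List.foldl_cons]
      refine ih _ ?_
      intro k' l' h' y hy
      rw [PySem.Dict.get?_insert] at h'
      split at h'
      · cases h'; simp at hy
      · exact hd k' l' h' y hy
  have step : ∀ (es : List (String × String)) (d : PySem.Dict String (List String)),
      (∀ e ∈ es, e.1 ∈ pvEndP aristas ∧ e.2 ∈ pvEndP aristas) →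
      (∀ k' l', d.get? k' = some l' → ∀ y ∈ l', y ∈ pvEndP aristas) →
      ∀ k' l', ((es.foldl (fun d e => pvAppendNb (pvAppendNb d e.1 e.2) e.2 e.1) d).get? k' = some l') →
        ∀ y ∈ l', y ∈ pvEndP aristas := by
    intro es
    induction es with
    | nil => intro d _ hd; exact hd
    | cons e t ih =>
      intro d hmem hd
      simp only [List.foldl_cons]
      refine ih _ (fun e' he' => hmem e' (List.mem_cons_of_mem _ he')) ?_
      have h1 := hmem e (List.mem_cons_self ..)
      exact pvAppendNb_get?_prop _ _ _ _ (pvAppendNb_get?_prop _ _ _ _ hd h1.2) h1.1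
  intro k l h
  refine step aristas _ ?_ (base PySem.Dict.empty (by simp [PySem.Dict.get?_empty]) vertices) k l h
  intro e he
  constructor <;> · unfold pvEndP; rw [List.mem_flatMap]; exact ⟨e, he, by simp⟩

lemma pvAppendNb_get?_len (d : PySem.Dict String (List String)) (k x : String) (m : Nat)
    (hP : ∀ k' l, d.get? k' = some l → l.length ≤ m) :
    ∀ k' l, (pvAppendNb d k x).get? k' = some l → l.length ≤ m + 1 := by
  unfold pvAppendNb
  cases hd : d.get? k with
  | none => intro k' l h; exact le_trans (hP k' l h) (Nat.le_succ m)
  | some l0 =>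
    intro k' l h
    rw [PySem.Dict.get?_insert] at h
    split at h
    · cases h; have := hP k l0 hd; simp; omega
    · exact le_trans (hP k' l h) (Nat.le_succ m)

lemma pvAdj_len (vertices : List String) (aristas : List (String × String)) (k : String)
    (l : List String) (h : (pvBuildGrafo vertices aristas).get? k = some l) :
    l.length ≤ 2 * aristas.length := by
  revert k l h
  unfold pvBuildGrafo
  have base : ∀ (vs : List String) (d : PySem.Dict String (List String)),
      (∀ k' l', d.get? k' = some l' → l'.length ≤ 0) →
      ∀ k' (l' : List String), ((vs.foldl (fun d v => d.insert v ([]:List String)) d).get? k' = some l') → l'.length ≤ 0 := by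
    intro vs
    induction vs with
    | nil => exact fun d hd => hd
    | cons v t ih =>
      intro d hd
      simp only [List.foldl_cons]
      refine ih _ ?_
      intro k' l' h'
      rw [PySem.Dict.get?_insert] at h'
      split at h'
      · cases h'; simp
      · exact hd k' l' h'
  have step : ∀ (es : List (String × String)) (d : PySem.Dict String (List String)) (m : Nat),
      (∀ k' l', d.get? k' = some l' → l'.length ≤ m) →
      ∀ k' l', ((es.foldl (fun d e => pvAppendNb (pvAppendNb d e.1 e.2) e.2 e.1) d).get? k' = some l') →
        l'.length ≤ m + 2 * es.length := by
    intro es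
    induction es with
    | nil => intro d m hd k' l' h'; simpa using hd k' l' h'
    | cons e t ih =>
      intro d m hd
      simp only [List.foldl_cons]
      intro k' l' h'
      have := ih _ (m + 2) (pvAppendNb_get?_len _ _ _ _ (pvAppendNb_get?_len _ _ _ _ hd)) k' l' h'
      simp [List.length_cons] at this ⊢
      omega
  intro k l h
  have := step aristas _ 0 (base vertices PySem.Dict.empty (by simp [PySem.Dict.get?_empty])) k l h
  omega

lemma pvFilter_mono {α : Type} (l : List α) (p q : α → Bool)
    (h : ∀ x, q x = true → p x = true) : (l.filter q).length ≤ (l.filter p).length := by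
  induction l with
  | nil => simp
  | cons a t ih =>
    by_cases hq : q a = true
    · have hp := h a hq
      simp [hq, hp]; omega
    · have hq' : q a = false := by simpa using hq
      simp only [List.filter_cons, hq']
      cases hp : p a <;> simp <;> omega

lemma pvFilter_strict {α : Type} [DecidableEq α] (l : List α) (p q : α → Bool) (a : α)
    (hnd : l.Nodup) (ha : a ∈ l) (hp : p a = true) (hq : q a = false)
    (hx : ∀ x, x ≠ a → q x = p x) : (l.filter q).length < (l.filter p).length := by
  induction l with
  | nil => simp at ha
  | cons b t ih =>
    rcases List.nodup_cons.mp hnd with ⟨hbt, hndt⟩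
    rcases List.mem_cons.mp ha with rfl | hat
    · have heq : t.filter q = t.filter p :=
        List.filter_congr (fun x hxt => hx x (fun hxa => hbt (hxa ▸ hxt)))
      simp [hp, hq, heq]
    · have hmono := pvFilter_mono t p q (fun x hqx => by
        by_cases hxa : x = a
        · subst hxa; rw [hq] at hqx; exact absurd hqx (by simp)
        · rw [← hx x hxa]; exact hqx)
      have hlt := ih hndt hat
      by_cases hb : b = a
      · subst hb; exact absurd hat hbt
      · rw [List.filter_cons, List.filter_cons, hx b hb]
        cases p b <;> simp <;> omega

lemma pvUnvis_insert_le (l : List String) (vis : PySem.Dict String Bool) (k : String) :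
    pvUnvis l (vis.insert k true) ≤ pvUnvis l vis := by
  apply pvFilter_mono
  intro x hx
  rw [PySem.Dict.getD_insert] at hx
  by_cases hxk : x = k
  · simp [hxk] at hx
  · simpa [hxk] using hx

lemma pvUnvis_mono (l : List String) (vis vis' : PySem.Dict String Bool)
    (h : ∀ k, vis.getD k false = true → vis'.getD k false = true) :
    pvUnvis l vis' ≤ pvUnvis l vis := by
  apply pvFilter_mono
  intro x hx
  cases hv : vis.getD x false with
  | false => simp
  | true => simp [h x hv] at hx

lemma pvUnvis_insert_lt (l : List String) (vis : PySem.Dict String Bool) (k : String)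
    (hnd : l.Nodup) (hk : k ∈ l) (hv : vis.getD k false = false) :
    pvUnvis l (vis.insert k true) < pvUnvis l vis := by
  apply pvFilter_strict (a := k) (hnd := hnd) (ha := hk)
  · simp [hv]
  · simp [PySem.Dict.getD_insert_self]
  · intro x hx
    rw [PySem.Dict.getD_insert_of_ne vis true false hx]

lemma pvShape (g : PySem.Dict String (List String)) (nfin : String) : ∀ fuel : Nat,
    (∀ nodo vis cam b vis' cam', pvDfsA g nfin fuel nodo vis cam = some (b, vis', cam') →
      (∀ k, vis.getD k false = true → vis'.getD k false = true) ∧ (b = false → cam' = cam)) ∧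
    (∀ vs vis cam b vis' cam', pvLoopA g nfin fuel vs vis cam = some (b, vis', cam') →
      (∀ k, vis.getD k false = true → vis'.getD k false = true) ∧ (b = false → cam' = cam.dropLast)) := by
  intro fuel
  induction fuel using Nat.strong_induction_on with
  | _ fuel ih =>
  have hgrow : ∀ (vis : PySem.Dict String Bool) (nodo : String) k,
      vis.getD k false = true → (vis.insert nodo true).getD k false = true := by
    intro vis nodo k hk
    rw [PySem.Dict.getD_insert]; split <;> simp [hk]
  have hdfs : ∀ nodo vis cam b vis' cam', pvDfsA g nfin fuel nodo vis cam = some (b, vis', cam') →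
      (∀ k, vis.getD k false = true → vis'.getD k false = true) ∧ (b = false → cam' = cam) := by
    intro nodo vis cam b vis' cam' h
    match fuel, ih with
    | 0, _ => rw [pvDfsA] at h; cases h
    | f+1, ih =>
      rw [pvDfsA] at h
      by_cases hfin : nodo = nfin
      · rw [if_pos hfin] at h
        cases h
        exact ⟨hgrow vis nodo, by simp⟩
      · rw [if_neg hfin] at h
        cases hg : g.get? nodo with
        | none =>
          rw [hg] at h; cases h
          exact ⟨hgrow vis nodo, fun _ => rfl⟩
        | some vecinos =>
          rw [hg] at h
          have := (ih f (Nat.lt_succ_self f)).2 _ _ _ _ _ _ h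
          exact ⟨fun k hk => this.1 k (hgrow vis nodo k hk),
                 fun hb => by rw [this.2 hb, List.dropLast_concat]⟩
  refine ⟨hdfs, ?_⟩
  intro vs
  induction vs with
  | nil =>
    intro vis cam b vis' cam' h
    rw [pvLoopA] at h; cases h
    exact ⟨fun k hk => hk, fun _ => rfl⟩
  | cons v t ihv =>
    intro vis cam b vis' cam' h
    rw [pvLoopA] at h
    split at h
    · exact ihv vis cam b vis' cam' h
    · cases hd : pvDfsA g nfin fuel v vis cam with
      | none => rw [hd] at h; cases h
      | some r =>
        obtain ⟨b2, vis2, cam2⟩ := r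
        rw [hd] at h
        have hD := hdfs _ _ _ _ _ _ hd
        cases b2 with
        | true => cases h; exact ⟨hD.1, by simp⟩
        | false =>
          have hT := ihv vis2 cam2 b vis' cam' h
          refine ⟨fun k hk => hT.1 k (hD.1 k hk), fun hb => ?_⟩
          rw [hT.2 hb, hD.2 rfl]

-- sufficiency and fuel-irrelevance for A's dfs
lemma pvSuff (g : PySem.Dict String (List String)) (nfin : String) (hnd : g.keys.Nodup) :
    ∀ fuel : Nat,
    (∀ nodo vis cam, vis.getD nodo false = false → pvUnvis g.keys vis + 2 ≤ fuel →
      ∀ f' ≥ fuel, pvDfsA g nfin f' nodo vis cam = pvDfsA g nfin fuel nodo vis cam ∧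
        pvDfsA g nfin fuel nodo vis cam ≠ none) ∧
    (∀ vs vis cam, pvUnvis g.keys vis + 2 ≤ fuel →
      ∀ f' ≥ fuel, pvLoopA g nfin f' vs vis cam = pvLoopA g nfin fuel vs vis cam ∧
        pvLoopA g nfin fuel vs vis cam ≠ none) := by
  intro fuel
  induction fuel using Nat.strong_induction_on with
  | _ fuel ih =>
  have hdfs : ∀ nodo vis cam, vis.getD nodo false = false → pvUnvis g.keys vis + 2 ≤ fuel →
      ∀ f' ≥ fuel, pvDfsA g nfin f' nodo vis cam = pvDfsA g nfin fuel nodo vis cam ∧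
        pvDfsA g nfin fuel nodo vis cam ≠ none := by
    intro nodo vis cam hno hu f' hf'
    obtain ⟨fm, rfl⟩ : ∃ fm, fuel = fm + 1 := ⟨fuel - 1, by omega⟩
    obtain ⟨fm', rfl⟩ : ∃ fm', f' = fm' + 1 := ⟨f' - 1, by omega⟩
    have hfm : fm ≤ fm' := by omega
    rw [pvDfsA, pvDfsA]
    by_cases hfin : nodo = nfin
    · rw [if_pos hfin, if_pos hfin]; exact ⟨rfl, by simp⟩
    · rw [if_neg hfin, if_neg hfin]
      cases hg : g.get? nodo with
      | none => exact ⟨rfl, by simp⟩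
      | some vecinos =>
        have hmem : nodo ∈ g.keys := by
          by_contra hmem
          rw [(PySem.Dict.get?_eq_none_iff_not_mem_keys g nodo).mpr hmem] at hg
          cases hg
        have hlt := pvUnvis_insert_lt g.keys vis nodo hnd hmem hno
        have hu1 : pvUnvis g.keys (vis.insert nodo true) + 2 ≤ fm := by omega
        have hL := (ih fm (Nat.lt_succ_self fm)).2 vecinos (vis.insert nodo true) (cam ++ [nodo]) hu1
        exact ⟨(hL fm' hfm).1, (hL fm (le_refl fm)).2⟩
  refine ⟨hdfs, ?_⟩
  intro vs
  induction vs with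
  | nil =>
    intro vis cam hu f' hf'
    rw [pvLoopA, pvLoopA]; exact ⟨rfl, by simp⟩
  | cons v t ihv =>
    intro vis cam hu f' hf'
    rw [pvLoopA, pvLoopA]
    by_cases hv : vis.getD v false
    · rw [if_pos hv, if_pos hv]
      exact ihv vis cam hu f' hf'
    · rw [if_neg hv, if_neg hv]
      have hv' : vis.getD v false = false := by simpa using hv
      have hD := hdfs v vis cam hv' hu
      rw [(hD f' hf').1]
      cases hd : pvDfsA g nfin fuel v vis cam with
      | none => exact absurd hd (hD fuel (le_refl fuel)).2
      | some r =>
        obtain ⟨b2, vis2, cam2⟩ := r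
        cases b2 with
        | true => exact ⟨rfl, by simp⟩
        | false =>
          have hgrow := ((pvShape g nfin fuel).1 _ _ _ _ _ _ hd).1
          have hu2 : pvUnvis g.keys vis2 + 2 ≤ fuel :=
            le_trans (by have := pvUnvis_mono g.keys vis vis2 hgrow; omega) hu
          exact ihv vis2 cam2 hu2 f' hf'

-- the simulation: B's stack loop computes pvProcA
lemma pvSim (g : PySem.Dict String (List String)) (nfin : String)
    (aristas : List (String × String)) (F : Nat) (hnd : g.keys.Nodup)
    (hadj : ∀ k l, g.get? k = some l → ∀ x ∈ l, x ∈ pvEndP aristas)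
    (hlen : ∀ k l, g.get? k = some l → l.length ≤ 2*aristas.length) :
    ∀ fB : Nat, ∀ stack vis, pvPhi g aristas stack vis < fB →
      pvUnvis g.keys vis + 3 ≤ F →
      pvStepB g nfin fB stack vis = some (pvProcA g nfin F stack vis) := by
  intro fB
  induction fB with
  | zero => intro stack vis h; omega
  | succ n ihn =>
  intro stack vis hPhi hF
  match stack with
  | [] => rw [pvStepB, pvProcA]
  | (nodo, i) :: rest =>
    rw [pvStepB]
    cases hg : g.get? nodo with
    | none =>
      have hgd : g.getD nodo [] = [] := PySem.Dict.getD_of_get?_eq_none g [] hg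
      have hPhi' : pvPhi g aristas rest vis < n := by
        unfold pvPhi at hPhi ⊢
        simp only [List.map_cons, List.sum_cons, hgd, List.length_cons, List.length_nil,
          Nat.zero_sub] at hPhi
        omega
      rw [ihn rest vis hPhi' hF, pvProcA, hg]
    | some vecinos =>
      simp only []
      have hgd : g.getD nodo [] = vecinos := PySem.Dict.getD_of_get?_eq_some g [] hg
      by_cases h : i < vecinos.length
      · rw [dif_pos h]
        have hdrop : vecinos.drop i = vecinos[i] :: vecinos.drop (i+1) :=
          List.drop_eq_getElem_cons h
        by_cases hvv : vis.getD vecinos[i] false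
        · -- visited neighbour: advance the index
          rw [if_pos hvv]
          have hPhi' : pvPhi g aristas ((nodo, i+1) :: rest) vis < n := by
            unfold pvPhi at hPhi ⊢
            simp only [List.map_cons, List.sum_cons, hgd, List.length_cons] at hPhi ⊢
            omega
          rw [ihn _ vis hPhi' hF]
          congr 1
          conv_lhs => rw [pvProcA, hg]
          conv_rhs => rw [pvProcA, hg]
          simp only []
          rw [hdrop, pvLoopA, if_pos hvv]
          simp only [List.map_cons]
        · rw [if_neg hvv]
          have hvv' : vis.getD vecinos[i] false = false := by simpa using hvv
          obtain ⟨F1, rfl⟩ : ∃ F1, F = F1 + 1 := ⟨F - 1, by omega⟩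
          by_cases hfin : vecinos[i] = nfin
          · -- found the end node
            rw [if_pos hfin]
            rw [pvProcA, hg]
            simp only []
            rw [hdrop, pvLoopA, if_neg hvv, pvDfsA, if_pos hfin]
            simp
          · -- push a fresh frame
            rw [if_neg hfin]
            have hmemE : vecinos[i] ∈ PySem.Set.ofList (pvEndP aristas) :=
              (PySem.Set.mem_ofList _ _).mpr (hadj nodo vecinos hg _ (List.getElem_mem h))
            have hUlt := pvUnvis_insert_lt (PySem.Set.ofList (pvEndP aristas)) vis vecinos[i]
              (PySem.Set.nodup_ofList _) hmemE hvv'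
            have hLv : (g.getD vecinos[i] []).length ≤ 2*aristas.length := by
              cases hgv : g.get? vecinos[i] with
              | none => rw [PySem.Dict.getD_of_get?_eq_none g [] hgv]; simp
              | some l2 => rw [PySem.Dict.getD_of_get?_eq_some g [] hgv]; exact hlen _ _ hgv
            have hPhi' : pvPhi g aristas ((vecinos[i], 0) :: (nodo, i+1) :: rest)
                (vis.insert vecinos[i] true) < n := by
              unfold pvPhi at hPhi ⊢
              simp only [List.map_cons, List.sum_cons, hgd, List.length_cons] at hPhi ⊢
              have hm : pvUnvis (PySem.Set.ofList (pvEndP aristas)) (vis.insert vecinos[i] true)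
                    * (2*aristas.length+2) + (2*aristas.length+2)
                  ≤ pvUnvis (PySem.Set.ofList (pvEndP aristas)) vis * (2*aristas.length+2) := by
                have := Nat.mul_le_mul_right (k := 2*aristas.length+2) hUlt
                rwa [Nat.succ_mul] at this
              omega
            have hF' : pvUnvis g.keys (vis.insert vecinos[i] true) + 3 ≤ F1 + 1 :=
              le_trans (by have := pvUnvis_insert_le g.keys vis vecinos[i]; omega) hF
            rw [ihn _ _ hPhi' hF']
            congr 1
            conv_lhs => rw [pvProcA]
            conv_rhs => rw [pvProcA, hg]
            simp only []
            rw [hdrop, pvLoopA, if_neg hvv, pvDfsA, if_neg hfin]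
            cases hgv : g.get? vecinos[i] with
            | none =>
              simp only []
              rw [pvProcA, hg]
              simp only [List.map_cons]
            | some vecs2 =>
              simp only []
              have hkmem : vecinos[i] ∈ g.keys := by
                by_contra hmm
                rw [(PySem.Dict.get?_eq_none_iff_not_mem_keys g vecinos[i]).mpr hmm] at hgv
                cases hgv
              have hUk := pvUnvis_insert_lt g.keys vis vecinos[i] hnd hkmem hvv'
              have hu2 : pvUnvis g.keys (vis.insert vecinos[i] true) + 2 ≤ F1 := by omega
              have hcam : ((((vecinos[i], 0) :: (nodo, i+1) :: rest).map Prod.fst).reverse)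
                  = (((nodo, i) :: rest).map Prod.fst).reverse ++ [vecinos[i]] := by simp
              have hirr := ((pvSuff g nfin hnd F1).2 vecs2 (vis.insert vecinos[i] true)
                ((((nodo, i) :: rest).map Prod.fst).reverse ++ [vecinos[i]]) hu2 (F1+1) (Nat.le_succ F1)).1
              rw [hcam, List.drop_zero, hirr]
              rcases hX : pvLoopA g nfin F1 vecs2 (vis.insert vecinos[i] true)
                  ((((nodo, i) :: rest).map Prod.fst).reverse ++ [vecinos[i]]) with _ | ⟨b, v3, c3⟩
              · rfl
              · cases b with
                | true => rfl
                | false =>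
                  have hc3 : c3 = (((nodo, i) :: rest).map Prod.fst).reverse := by
                    have := ((pvShape g nfin F1).2 _ _ _ _ _ _ hX).2 rfl
                    rw [this, List.dropLast_concat]
                  subst hc3
                  simp only []
                  rw [pvProcA, hg]
                  simp only [List.map_cons]
      · rw [dif_neg h]
        have hPhi' : pvPhi g aristas rest vis < n := by
          unfold pvPhi at hPhi ⊢
          simp only [List.map_cons, List.sum_cons, hgd, List.length_cons] at hPhi
          have hz : vecinos.length - i = 0 := by omega
          rw [hz] at hPhi
          omega
        rw [ihn rest vis hPhi' hF]
        congr 1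
        rw [pvProcA, hg]
        simp only []
        have hdrop0 : vecinos.drop i = [] := List.drop_eq_nil_of_le (by omega)
        rw [hdrop0, pvLoopA]

lemma pvEndP_length (aristas : List (String × String)) :
    (pvEndP aristas).length = 2 * aristas.length := by
  induction aristas with
  | nil => rfl
  | cons e t ih => simp [pvEndP] at ih ⊢; omega

lemma pvUnvis_le_length (l : List String) (vis : PySem.Dict String Bool) :
    pvUnvis l vis ≤ l.length := List.length_filter_le _ l

lemma pvOfList_length_le (l : List String) :
    (PySem.Set.ofList l).length ≤ l.length :=
  (List.subperm_of_subset (PySem.Set.nodup_ofList l)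
    (fun x hx => (PySem.Set.mem_ofList l x).mp hx)).length_le

-- (the two wrappers agree on every input; Pre_ marks where the Pythons return rather than raise)
theorem encuentra_camino_simple_spec : Claim_equal_encuentra_camino_simple := by
  unfold Claim_equal_encuentra_camino_simple
  intro gl ini nfin _hdom _hpre
  unfold Spec_encuentra_camino_simple
  obtain ⟨vertices, aristas⟩ := gl
  unfold encuentra_camino_simple encuentra_camino_simple_alt
  simp only []
  have hk : (pvBuildGrafo vertices aristas).keys = PySem.List.dedup vertices :=
    pvKeys_buildGrafo vertices aristas
  have hnd : (pvBuildGrafo vertices aristas).keys.Nodup := by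
    rw [hk, PySem.List.dedup_eq_ofList]; exact PySem.Set.nodup_ofList _
  have hvis0 : ∀ k, (pvVis0 vertices).getD k false = false := pvVis0_getD vertices
  by_cases hif : ini = nfin
  · rw [if_pos hif, pvDfsA, if_pos hif]
    simp
  · rw [if_neg hif]
    cases hg : (pvBuildGrafo vertices aristas).get? ini with
    | none =>
      rw [pvDfsA, if_neg hif, hg]
      have h2 : 2 ≤ (2*aristas.length+1)*(2*aristas.length+2)+2*aristas.length+2 := by
        have := Nat.zero_le ((2*aristas.length+1)*(2*aristas.length+2))
        omega
      obtain ⟨m, hm⟩ : ∃ m, (2*aristas.length+1)*(2*aristas.length+2)+2*aristas.length+2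
          = (m + 1) + 1 := ⟨(2*aristas.length+1)*(2*aristas.length+2)+2*aristas.length, by omega⟩
      rw [hm, pvStepB, hg, pvStepB]
    | some vecinos =>
      have hmem : ini ∈ (pvBuildGrafo vertices aristas).keys := by
        by_contra hmm
        rw [(PySem.Dict.get?_eq_none_iff_not_mem_keys _ ini).mpr hmm] at hg
        cases hg
      have hkl : (pvBuildGrafo vertices aristas).keys.length ≤ vertices.length := by
        rw [hk, PySem.List.dedup_eq_ofList]
        exact pvOfList_length_le vertices
      have hu0 : pvUnvis (pvBuildGrafo vertices aristas).keys (pvVis0 vertices)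
          ≤ vertices.length :=
        le_trans (pvUnvis_le_length _ _) hkl
      have hu1 := pvUnvis_insert_lt (pvBuildGrafo vertices aristas).keys
        (pvVis0 vertices) ini hnd hmem (hvis0 ini)
      have hF : pvUnvis (pvBuildGrafo vertices aristas).keys
          ((pvVis0 vertices).insert ini true) + 3 ≤ vertices.length + 2 := by omega
      -- A side
      rw [show vertices.length + 2 = (vertices.length + 1) + 1 from rfl, pvDfsA,
        if_neg hif, hg]
      simp only [List.nil_append]
      -- fuel irrelevance for the top-level neighbour loop
      have hsuffL := (pvSuff (pvBuildGrafo vertices aristas) nfin hnd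
        (pvUnvis (pvBuildGrafo vertices aristas).keys ((pvVis0 vertices).insert ini true) + 2)).2
        vecinos ((pvVis0 vertices).insert ini true) [ini] (le_refl _)
      have eq1 := (hsuffL (vertices.length + 1) (by omega)).1
      have eq2 := (hsuffL ((vertices.length + 1) + 1) (by omega)).1
      -- B side
      have hE : (PySem.Set.ofList (pvEndP aristas)).length ≤ 2 * aristas.length := by
        have := pvOfList_length_le (pvEndP aristas)
        rw [pvEndP_length] at this
        exact this
      have hPhiInit : pvPhi (pvBuildGrafo vertices aristas) aristas [(ini, 0)]
          ((pvVis0 vertices).insert ini true)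
          < (2*aristas.length+1)*(2*aristas.length+2)+2*aristas.length+2 := by
        unfold pvPhi
        have hU : pvUnvis (PySem.Set.ofList (pvEndP aristas))
            ((pvVis0 vertices).insert ini true) ≤ 2 * aristas.length :=
          le_trans (pvUnvis_le_length _ _) hE
        have h1 : pvUnvis (PySem.Set.ofList (pvEndP aristas))
              ((pvVis0 vertices).insert ini true) * (2*aristas.length+2)
            ≤ 2*aristas.length * (2*aristas.length+2) := Nat.mul_le_mul_right _ hU
        have h2 : (2*aristas.length+1)*(2*aristas.length+2)
            = 2*aristas.length*(2*aristas.length+2) + (2*aristas.length+2) := by ring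
        have h3 : ((pvBuildGrafo vertices aristas).getD ini []).length ≤ 2*aristas.length := by
          rw [PySem.Dict.getD_of_get?_eq_some _ [] hg]
          exact pvAdj_len vertices aristas ini vecinos hg
        simp only [List.map_cons, List.sum_cons, List.map_nil, List.sum_nil, List.length_cons,
          List.length_nil]
        omega
      rw [pvSim (pvBuildGrafo vertices aristas) nfin aristas (vertices.length + 2) hnd
        (fun k l h => pvAdj_mem vertices aristas k l h)
        (fun k l h => pvAdj_len vertices aristas k l h)
        _ [(ini, 0)] ((pvVis0 vertices).insert ini true) hPhiInit hF]
      simp only []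
      rw [pvProcA, hg]
      simp only [List.drop_zero, List.map_cons, List.map_nil, List.reverse_cons,
        List.reverse_nil, List.nil_append]
      rw [show vertices.length + 2 = (vertices.length + 1) + 1 from rfl, eq2, ← eq1]
      rcases hY : pvLoopA (pvBuildGrafo vertices aristas) nfin (vertices.length + 1) vecinos
          ((pvVis0 vertices).insert ini true) [ini] with _ | ⟨b, v, c⟩
      · rfl
      · cases b with
        | true => rfl
        | false => rfl

-- ===== VERDICT (by name: the statement is the Claim_ definition above) =====
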